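-- pv_equiv track=rewrite | github.com/Einfeld686/MarsDiskSimulation | analysis/tools/make_coverage.py | extract_sections_with_equations
-- ===== SOURCE A (Python) =====
-- from typing import Dict, Iterable, List, Optional, Sequence, Tuple
--
-- def extract_sections_with_equations(content: str) -> List[str]:
--     sections: List[str] = []
--     current_lines: List[str] = []
--     seen_heading = False
--     for line in content.splitlines():
--         if line.startswith("### "):
--             if seen_heading and current_lines:
--                 sections.append("\n".join(current_lines).strip())
--             current_lines = []
--             seen_heading = True
--             continue
--         if seen_heading:
--             current_lines.append(line)
--     if seen_heading and current_lines:
--         sections.append("\n".join(current_lines).strip())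
--     return sections
-- ===== SOURCE B (Python) =====
-- from typing import List
--
--
-- def extract_sections_with_equations(content: str) -> List[str]:
--     lines = content.splitlines()
--     n = len(lines)
--     res: List[str] = []
--     i = 0
--     # skip the preamble before the first heading
--     while i < n and not lines[i].startswith("### "):
--         i += 1
--     # each iteration: lines[i] is a heading; scan its body up to the next heading
--     while i < n:
--         j = i + 1
--         while j < n and not lines[j].startswith("### "):
--             j += 1
--         if j > i + 1:
--             res.append("\n".join(lines[i + 1:j]).strip())
--         i = j
--     return res
-- ===== Notes on version B (the rewrite author's own statement) =====
-- stated objective: alternative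
-- what changed: Replaces the single stateful fold (sections/current_lines/seen_heading flags) by an index-scanning decomposition: skip the preamble, then repeatedly locate the next heading and emit the joined slice between consecutive headings.
import Mathlib
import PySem

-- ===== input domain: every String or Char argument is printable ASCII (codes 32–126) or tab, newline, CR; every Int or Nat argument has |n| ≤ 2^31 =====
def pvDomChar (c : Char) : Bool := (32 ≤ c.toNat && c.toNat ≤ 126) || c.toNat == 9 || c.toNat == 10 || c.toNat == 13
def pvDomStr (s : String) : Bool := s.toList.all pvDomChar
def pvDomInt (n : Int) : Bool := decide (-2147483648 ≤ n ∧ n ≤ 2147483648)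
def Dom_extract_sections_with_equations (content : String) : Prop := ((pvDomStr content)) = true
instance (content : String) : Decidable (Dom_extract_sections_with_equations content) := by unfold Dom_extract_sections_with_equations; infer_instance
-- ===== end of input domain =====

-- B replaces A's single stateful fold by skip-preamble + per-heading slice scanning; objective: alternative decomposition, same cost.

-- ===== PORT A =====
-- one step of A's for-loop over the state (sections, current_lines, seen_heading)
def pvAStep (st : List String × List String × Bool) (line : String) :
    List String × List String × Bool :=
  if PySem.Str.startswith line "### " then
    (if st.2.2 && !st.2.1.isEmpty then
        st.1 ++ [PySem.Str.strip (PySem.Str.join "\n" st.2.1)]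
      else st.1,
     [], true)
  else if st.2.2 then (st.1, st.2.1 ++ [line], st.2.2)
  else st

def extract_sections_with_equations (content : String) : List String :=
  let st := (PySem.Str.splitlines content).foldl pvAStep ([], [], false)
  -- final flush: if seen_heading and current_lines
  if st.2.2 && !st.2.1.isEmpty then
    st.1 ++ [PySem.Str.strip (PySem.Str.join "\n" st.2.1)]
  else st.1

-- ===== PORT B =====
-- B's first while-loop: advance past the lines before the first heading
def pvBSkip : List String → List String
  | [] => []
  | l :: rest => if PySem.Str.startswith l "### " then l :: rest else pvBSkip rest

-- B's outer while-loop: the head of the argument is a heading line; the inner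
-- while-loop scanning to the next heading is the takeWhile/dropWhile split
def pvBChunks : List String → List String
  | [] => []
  | _ :: rest =>
      let body := rest.takeWhile (fun x => !PySem.Str.startswith x "### ")
      let rest' := rest.dropWhile (fun x => !PySem.Str.startswith x "### ")
      (if !body.isEmpty then [PySem.Str.strip (PySem.Str.join "\n" body)] else []) ++
        pvBChunks rest'
termination_by ls => ls.length
decreasing_by
  simpa using Nat.lt_succ_of_le (List.length_dropWhile_le _ rest)

def extract_sections_with_equations_alt (content : String) : List String :=
  pvBChunks (pvBSkip (PySem.Str.splitlines content))

-- ===== PRECONDITION & SPEC =====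
def Spec_extract_sections_with_equations (content : String) (out : List String) : Prop := out = extract_sections_with_equations_alt content
instance (content : String) (out : List String) : Decidable (Spec_extract_sections_with_equations content out) := by unfold Spec_extract_sections_with_equations; infer_instance

-- ===== CLAIM (what is proved, stated in full; the proofs are below) =====
def Claim_equal_extract_sections_with_equations : Prop := ∀ (content : String), Dom_extract_sections_with_equations content → Spec_extract_sections_with_equations content (extract_sections_with_equations content)

-- ===== LEMMAS AND PROOFS =====

-- emit a group as A's flush does
def pvEmit (cur : List String) : List String :=
  if !cur.isEmpty then [PySem.Str.strip (PySem.Str.join "\n" cur)] else []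

-- finalize A's end-of-loop state
def pvFin (st : List String × List String × Bool) : List String :=
  if st.2.2 && !st.2.1.isEmpty then
    st.1 ++ [PySem.Str.strip (PySem.Str.join "\n" st.2.1)]
  else st.1

lemma pvFin_true (secs cur : List String) : pvFin (secs, cur, true) = secs ++ pvEmit cur := by
  by_cases h : cur.isEmpty <;> simp [pvFin, pvEmit, h]

-- A's fold before any heading is seen: nothing accumulates until pvBSkip's stop point
lemma pvBChunks_cons (l : String) (rest : List String) :
    pvBChunks (l :: rest) =
      pvEmit (rest.takeWhile (fun x => !PySem.Str.startswith x "### ")) ++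
        pvBChunks (rest.dropWhile (fun x => !PySem.Str.startswith x "### ")) := by
  rw [pvBChunks]
  rfl

lemma foldl_unseen (ls : List String) (secs : List String) :
    ls.foldl pvAStep (secs, [], false) =
      match pvBSkip ls with
      | [] => (secs, ([] : List String), false)
      | _ :: t => t.foldl pvAStep (secs, [], true) := by
  induction ls generalizing secs with
  | nil => simp [pvBSkip]
  | cons l ls ih =>
      by_cases h : PySem.Str.startswith l "### " = true
      all_goals simp only [] at h; simp at h
      · simp [pvBSkip, h, pvAStep]
      · simp only [List.foldl_cons]
        have hstep : pvAStep (secs, [], false) l = (secs, [], false) := by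
          simp [pvAStep, h]
        rw [hstep, ih secs]
        have hsk : pvBSkip (l :: ls) = pvBSkip ls := by simp [pvBSkip, h]
        rw [hsk]

-- A's fold after a heading: current group = cur ++ lines up to the next heading,
-- then the remaining chunks
lemma foldl_seen (ls : List String) (secs cur : List String) :
    pvFin (ls.foldl pvAStep (secs, cur, true)) =
      secs ++ pvEmit (cur ++ ls.takeWhile (fun x => !PySem.Str.startswith x "### ")) ++
        pvBChunks (ls.dropWhile (fun x => !PySem.Str.startswith x "### ")) := by
  induction ls generalizing secs cur with
  | nil => simp [pvFin_true, pvBChunks]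
  | cons l ls ih =>
      by_cases h : PySem.Str.startswith l "### " = true
      all_goals simp only [] at h; simp at h
      · have hstep : pvAStep (secs, cur, true) l = (secs ++ pvEmit cur, [], true) := by
          by_cases hc : cur.isEmpty <;> simp [pvAStep, h, pvEmit, hc]
        rw [List.foldl_cons, hstep, ih]
        have ht : List.takeWhile (fun x => !PySem.Str.startswith x "### ") (l :: ls) = [] := by
          simp [List.takeWhile_cons, h]
        have hd : List.dropWhile (fun x => !PySem.Str.startswith x "### ") (l :: ls) = l :: ls := by
          simp [List.dropWhile_cons, h]
        rw [ht, hd, pvBChunks_cons]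
        simp
      · have hstep : pvAStep (secs, cur, true) l = (secs, cur ++ [l], true) := by
          simp [pvAStep, h]
        rw [List.foldl_cons, hstep, ih]
        simp [h]

-- ===== VERDICT (by name: the statement is the Claim_ definition above) =====
theorem extract_sections_with_equations_spec : Claim_equal_extract_sections_with_equations := by
  intro content _
  unfold Spec_extract_sections_with_equations
  show extract_sections_with_equations content = extract_sections_with_equations_alt content
  unfold extract_sections_with_equations extract_sections_with_equations_alt
  set ls := PySem.Str.splitlines content with hls
  have h := foldl_unseen ls []
  cases hsk : pvBSkip ls with
  | nil =>
      rw [hsk] at h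
      show pvFin (ls.foldl pvAStep ([], [], false)) = _
      rw [h]
      simp [pvFin, pvBChunks]
  | cons hd t =>
      rw [hsk] at h
      show pvFin (ls.foldl pvAStep ([], [], false)) = _
      rw [h, foldl_seen, pvBChunks_cons]
      simp [pvEmit]
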